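-- pv_equiv track=rewrite | github.com/GoldExcalibur/EdgeTrans4Mark | lib/utils/share.py | count_body_part
-- ===== SOURCE A (Python) =====
-- def count_body_part(dcm_info_dict):
--     body_part_dict = {}
--     for sub_dir in sorted(dcm_info_dict.keys()):
--         dcm_info = dcm_info_dict[sub_dir]
--         body_part = dcm_info['body_part']
--         if body_part in body_part_dict:
--             body_part_dict[body_part].append(sub_dir)
--         else:
--             body_part_dict[body_part] = [sub_dir]
--     return body_part_dict
-- ===== SOURCE B (Python) =====
-- def count_body_part(dcm_info_dict):
--     order = sorted(dcm_info_dict)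
--     bps = list(dict.fromkeys(dcm_info_dict[sd]['body_part'] for sd in order))
--     return {bp: [sd for sd in order if dcm_info_dict[sd]['body_part'] == bp]
--             for bp in bps}
-- ===== Notes on version B (the rewrite author's own statement) =====
-- stated objective: alternative
-- what changed: Replaces the incremental append-into-dict loop by a declarative two-pass comprehension: dedup the body_part sequence once (dict.fromkeys) and build each group with a per-key filter over the sorted sub_dirs.
import Mathlib
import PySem

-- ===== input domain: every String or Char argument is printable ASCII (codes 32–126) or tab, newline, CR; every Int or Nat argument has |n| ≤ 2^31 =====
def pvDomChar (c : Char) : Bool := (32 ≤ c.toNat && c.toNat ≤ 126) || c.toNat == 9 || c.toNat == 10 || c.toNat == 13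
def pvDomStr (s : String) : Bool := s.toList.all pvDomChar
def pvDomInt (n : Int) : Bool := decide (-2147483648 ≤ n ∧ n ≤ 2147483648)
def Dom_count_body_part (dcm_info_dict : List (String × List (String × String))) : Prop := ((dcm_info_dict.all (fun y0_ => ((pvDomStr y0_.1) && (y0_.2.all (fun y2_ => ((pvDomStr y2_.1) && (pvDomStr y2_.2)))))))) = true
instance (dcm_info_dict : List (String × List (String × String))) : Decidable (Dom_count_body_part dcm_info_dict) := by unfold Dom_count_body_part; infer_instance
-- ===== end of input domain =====

-- ===== PORT A =====
-- B rebuilds the same grouping as a dedup-then-filter comprehension instead of A's append-into-dict loop (alternative decomposition, not faster).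
-- dcm_info_dict[sd]['body_part']; the .getD defaults are unreachable under Pre_ (sd ranges over the dict's own keys, and every info dict carries 'body_part')
def bodyPartOf (dcm_info_dict : List (String × List (String × String))) (sd : String) : String :=
  ((PySem.Dict.mk (((PySem.Dict.mk dcm_info_dict).get? sd).getD [])).get? "body_part").getD ""

def count_body_part (dcm_info_dict : List (String × List (String × String))) : List (String × List String) :=
  ((PySem.List.sorted ((PySem.Dict.mk dcm_info_dict).keys) (fun x => x) false).foldl
    (fun body_part_dict sub_dir =>
      let body_part := bodyPartOf dcm_info_dict sub_dir
      if body_part_dict.contains body_part then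
        body_part_dict.modify body_part [] (fun g => g ++ [sub_dir])
      else
        body_part_dict.insert body_part [sub_dir])
    (PySem.Dict.empty : PySem.Dict String (List String))).items

-- ===== PORT B =====
def count_body_part_alt (dcm_info_dict : List (String × List (String × String))) : List (String × List String) :=
  let order := PySem.List.sorted ((PySem.Dict.mk dcm_info_dict).keys) (fun x => x) false
  let bps := PySem.List.dedup (order.map (bodyPartOf dcm_info_dict))
  bps.map (fun bp => (bp, order.filter (fun sd => bodyPartOf dcm_info_dict sd == bp)))

-- ===== PRECONDITION & SPEC =====
-- Pre_ excludes exactly the inputs on which Python A raises KeyError: some entry's info dict lacks the 'body_part' key.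
def Pre_count_body_part (dcm_info_dict : List (String × List (String × String))) : Prop :=
  ∀ p ∈ dcm_info_dict, (PySem.Dict.mk p.2).contains "body_part" = true
instance (dcm_info_dict : List (String × List (String × String))) : Decidable (Pre_count_body_part dcm_info_dict) := by unfold Pre_count_body_part; infer_instance
def pvWitness_count_body_part : (List (String × List (String × String))) :=
  [("s2", [("body_part", "chest")]), ("s1", [("body_part", "arm"), ("side", "L")])]
def Spec_count_body_part (dcm_info_dict : List (String × List (String × String))) (out : List (String × List String)) : Prop := out = count_body_part_alt dcm_info_dict
instance (dcm_info_dict : List (String × List (String × String))) (out : List (String × List String)) : Decidable (Spec_count_body_part dcm_info_dict out) := by unfold Spec_count_body_part; infer_instance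

-- ===== CLAIM (what is proved, stated in full; the proofs are below) =====
def Claim_equal_count_body_part : Prop := ∀ (dcm_info_dict : List (String × List (String × String))), Dom_count_body_part dcm_info_dict → Pre_count_body_part dcm_info_dict → Spec_count_body_part dcm_info_dict (count_body_part dcm_info_dict)

-- ===== LEMMAS AND PROOFS =====

-- A's two branches are exactly one Dict.modify step
lemma step_eq_modify (d : PySem.Dict String (List String)) (bp sd : String) :
    (if d.contains bp then d.modify bp [] (fun g => g ++ [sd]) else d.insert bp [sd])
      = d.modify bp [] (fun g => g ++ [sd]) := by
  by_cases h : d.contains bp = true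
  · simp [h]
  · have hg : d.getD bp [] = [] := PySem.Dict.getD_of_not_contains d [] (by simpa using h)
    simp [h, PySem.Dict.modify, hg]

-- the modify-loop over keys equals the pair form the PySem grouping lemma speaks about
lemma fold_pairs (l : List String) (k : String → String) (d : PySem.Dict String (List String)) :
    l.foldl (fun d sd => d.modify (k sd) [] (fun g => g ++ [sd])) d
      = (l.map (fun sd => (k sd, sd))).foldl (fun d p => d.modify p.1 [] (fun g => g ++ [p.2])) d := by
  simp [List.foldl_map]

-- ===== VERDICT (by name: the statement is the Claim_ definition above) =====
theorem count_body_part_spec : Claim_equal_count_body_part := by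
  intro l _ _
  unfold Spec_count_body_part count_body_part count_body_part_alt
  set order := PySem.List.sorted ((PySem.Dict.mk l).keys) (fun x => x) false with horder
  set k := bodyPartOf l with hk
  have hstep :
      order.foldl (fun d sd =>
          let bp := k sd
          if d.contains bp then d.modify bp [] (fun g => g ++ [sd]) else d.insert bp [sd])
        (PySem.Dict.empty : PySem.Dict String (List String))
        = order.foldl (fun d sd => d.modify (k sd) [] (fun g => g ++ [sd])) PySem.Dict.empty := by
    apply PySem.List.foldl_congr_mem
    intro d sd _
    exact step_eq_modify d (k sd) sd
  rw [hstep, fold_pairs]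
  set F := (order.map (fun sd => (k sd, sd))).foldl
      (fun d p => d.modify p.1 [] (fun g => g ++ [p.2])) (PySem.Dict.empty : PySem.Dict String (List String)) with hF
  have hnodup : F.keys.Nodup := by
    rw [hF, ← fold_pairs]
    exact PySem.Dict.nodup_keys_foldl_modify_key order k [] (fun d sd g => g ++ [sd]) _ PySem.Dict.nodup_keys_empty
  have hkeys : F.keys = PySem.List.dedup (order.map k) := by
    rw [hF, PySem.Dict.keys_foldl_modify_key]
    simp [PySem.Set.update, PySem.Set.ofList_eq_foldl, Function.comp_def]
  rw [PySem.Dict.items_eq_map_keys F hnodup [], hkeys]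
  apply List.map_congr_left
  intro bp _
  congr 1
  rw [hF, PySem.Dict.getD_foldl_modify_append]
  simp [List.filter_map, Function.comp_def]
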